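-- pv_equiv track=rewrite | github.com/bana-handaga/chifoo_backend | apps/universities/management/commands/predict_wcu_area.py | parse_wcu_labels
-- ===== SOURCE A (Python) =====
-- SINTA_TO_WCU = {
--     'Science':     'Natural Sciences',
--     'Engineering': 'Engineering & Technology',
--     'Agriculture': 'Engineering & Technology',
--     'Health':      'Life Sciences & Medicine',
--     'Social':      'Social Sciences & Management',
--     'Economy':     'Social Sciences & Management',
--     'Education':   'Social Sciences & Management',
--     'Humanities':  'Arts & Humanities',
--     'Art':         'Arts & Humanities',
--     'Religion':    'Arts & Humanities',
-- }
--
-- WCU_PRIORITY = {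
--     'Life Sciences & Medicine':    1,
--     'Engineering & Technology':    2,
--     'Natural Sciences':            3,
--     'Arts & Humanities':           4,
--     'Social Sciences & Management': 5,
-- }
--
-- def parse_wcu_labels(subject_area: str) -> list[str]:
--     """Ubah string subject_area SINTA → list WCU group."""
--     if not subject_area:
--         return []
--     groups = set()
--     for cat in subject_area.split(','):
--         cat = cat.strip()
--         wcu = SINTA_TO_WCU.get(cat)
--         if wcu:
--             groups.add(wcu)
--     return sorted(groups, key=lambda g: WCU_PRIORITY[g])
-- ===== SOURCE B (Python) =====
-- # Each SINTA category mapped directly to its WCU priority number (1..5).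
-- SINTA_TO_PRIORITY = {
--     'Science':     3,
--     'Engineering': 2,
--     'Agriculture': 2,
--     'Health':      1,
--     'Social':      5,
--     'Economy':     5,
--     'Education':   5,
--     'Humanities':  4,
--     'Art':         4,
--     'Religion':    4,
-- }
--
-- # Group name for each priority number (index = priority; slot 0 unused).
-- GROUP_BY_PRIORITY = [
--     '',
--     'Life Sciences & Medicine',
--     'Engineering & Technology',
--     'Natural Sciences',
--     'Arts & Humanities',
--     'Social Sciences & Management',
-- ]
--
-- def parse_wcu_labels(subject_area: str) -> list[str]:
--     """Ubah string subject_area SINTA → list WCU group."""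
--     mask = 0
--     for cat in subject_area.split(','):
--         mask |= 1 << SINTA_TO_PRIORITY.get(cat.strip(), 0)
--     return [GROUP_BY_PRIORITY[p] for p in range(1, 6) if (mask >> p) & 1]
-- ===== Notes on version B (the rewrite author's own statement) =====
-- stated objective: alternative
-- what changed: Replaces A's set of group-name strings plus a key-sort by priority with a direct category-to-priority-number dictionary whose bits are OR'd into a single integer bitmask in one pass, decoded bit by bit (bits 1..5) into group names in priority order; no set, no sort, no early empty-string return.
import Mathlib
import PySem

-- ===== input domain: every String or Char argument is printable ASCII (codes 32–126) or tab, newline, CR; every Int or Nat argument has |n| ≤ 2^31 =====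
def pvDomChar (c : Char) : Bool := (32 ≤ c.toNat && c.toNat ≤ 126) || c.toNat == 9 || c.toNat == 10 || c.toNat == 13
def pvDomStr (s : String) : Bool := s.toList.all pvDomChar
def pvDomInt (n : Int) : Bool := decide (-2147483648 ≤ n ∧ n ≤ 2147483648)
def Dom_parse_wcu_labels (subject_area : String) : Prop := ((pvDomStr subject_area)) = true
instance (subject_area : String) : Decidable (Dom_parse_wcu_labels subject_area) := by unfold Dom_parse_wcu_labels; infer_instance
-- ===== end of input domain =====

-- B replaces A's set-of-group-names + key-sort with an integer bitmask of priority numbers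
-- OR'd together in one pass and decoded bit by bit in priority order (objective: alternative; no speed claim).

-- ===== PORT A =====
def SINTA_TO_WCU : PySem.Dict String String := PySem.Dict.ofList
  [("Science", "Natural Sciences"),
   ("Engineering", "Engineering & Technology"),
   ("Agriculture", "Engineering & Technology"),
   ("Health", "Life Sciences & Medicine"),
   ("Social", "Social Sciences & Management"),
   ("Economy", "Social Sciences & Management"),
   ("Education", "Social Sciences & Management"),
   ("Humanities", "Arts & Humanities"),
   ("Art", "Arts & Humanities"),
   ("Religion", "Arts & Humanities")]

def WCU_PRIORITY : PySem.Dict String Int := PySem.Dict.ofList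
  [("Life Sciences & Medicine", 1),
   ("Engineering & Technology", 2),
   ("Natural Sciences", 3),
   ("Arts & Humanities", 4),
   ("Social Sciences & Management", 5)]

-- getD … 0 is exact for WCU_PRIORITY[g]: every group A puts in the set is a key of WCU_PRIORITY,
-- so the Python lookup never raises and the default is never used.
def parse_wcu_labels (subject_area : String) : List String :=
  if subject_area = "" then []
  else
    let groups : PySem.Set String :=
      ((PySem.Str.split? subject_area ",").getD []).foldl (fun groups cat =>
        let cat := PySem.Str.strip cat
        match SINTA_TO_WCU.get? cat with
        | some wcu => if wcu = "" then groups else PySem.Set.add groups wcu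
        | none => groups) PySem.Set.empty
    PySem.List.sorted groups (fun g => WCU_PRIORITY.getD g 0) false

-- ===== PORT B =====
def SINTA_TO_PRIORITY : PySem.Dict String Int := PySem.Dict.ofList
  [("Science", 3),
   ("Engineering", 2),
   ("Agriculture", 2),
   ("Health", 1),
   ("Social", 5),
   ("Economy", 5),
   ("Education", 5),
   ("Humanities", 4),
   ("Art", 4),
   ("Religion", 4)]

def GROUP_BY_PRIORITY : List String :=
  ["",
   "Life Sciences & Medicine",
   "Engineering & Technology",
   "Natural Sciences",
   "Arts & Humanities",
   "Social Sciences & Management"]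

-- .toNat on the shift amount and on the list index is exact here: the dict values are 0..5 and
-- the range runs over 1..5, all nonnegative; pyGetD … "" is exact since 1 ≤ p ≤ 5 is in range.
def parse_wcu_labels_alt (subject_area : String) : List String :=
  let mask : Int :=
    ((PySem.Str.split? subject_area ",").getD []).foldl (fun mask cat =>
      PySem.Int.bor mask ((1 : Int) <<< (SINTA_TO_PRIORITY.getD (PySem.Str.strip cat) 0).toNat)) 0
  ((PySem.List.pyRange 1 6 1).filter (fun p => PySem.Int.band (mask >>> p.toNat) 1 != 0)).map
    (fun p => PySem.List.pyGetD GROUP_BY_PRIORITY p "")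

-- ===== PRECONDITION & SPEC =====
def Spec_parse_wcu_labels (subject_area : String) (out : List String) : Prop := out = parse_wcu_labels_alt subject_area
instance (subject_area : String) (out : List String) : Decidable (Spec_parse_wcu_labels subject_area out) := by unfold Spec_parse_wcu_labels; infer_instance

-- ===== CLAIM (what is proved, stated in full; the proofs are below) =====
def Claim_equal_parse_wcu_labels : Prop := ∀ (subject_area : String), Dom_parse_wcu_labels subject_area → Spec_parse_wcu_labels subject_area (parse_wcu_labels subject_area)

-- ===== LEMMAS AND PROOFS =====

-- the five WCU groups in priority order (proof vocabulary only)
def pvOrder : List String :=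
  ["Life Sciences & Medicine",
   "Engineering & Technology",
   "Natural Sciences",
   "Arts & Humanities",
   "Social Sciences & Management"]

-- the comma-split tokens mapped through SINTA_TO_WCU (shared intermediate of both proofs)
def pvMs (s : String) : List (Option String) :=
  ((PySem.Str.split? s ",").getD []).map (fun cat => SINTA_TO_WCU.get? (PySem.Str.strip cat))

-- priority number of a mapped token (0 for unknown), matching SINTA_TO_PRIORITY
def pvPri : Option String → Nat
  | none => 0
  | some g =>
    if g = "Life Sciences & Medicine" then 1
    else if g = "Engineering & Technology" then 2
    else if g = "Natural Sciences" then 3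
    else if g = "Arts & Humanities" then 4
    else if g = "Social Sciences & Management" then 5
    else 0

-- every value SINTA_TO_WCU.get? can return is one of the five WCU groups
theorem sinta_get?_mem_order (c w : String) (h : SINTA_TO_WCU.get? c = some w) :
    w ∈ pvOrder := by
  have h' := PySem.Dict.mem_items_of_get?_eq_some _ h
  simp only [SINTA_TO_WCU] at h'
  fin_cases h' <;> decide

-- the two B dictionaries agree with A's: priority lookup = pvPri of the WCU lookup
set_option maxHeartbeats 1000000 in
theorem pri_rel (c : String) :
    (SINTA_TO_PRIORITY.getD c 0).toNat = pvPri (SINTA_TO_WCU.get? c) := by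
  have h1 : SINTA_TO_PRIORITY = PySem.Dict.mk
    [("Science", 3), ("Engineering", 2), ("Agriculture", 2), ("Health", 1), ("Social", 5),
     ("Economy", 5), ("Education", 5), ("Humanities", 4), ("Art", 4), ("Religion", 4)] := by decide
  have h2 : SINTA_TO_WCU = PySem.Dict.mk
    [("Science", "Natural Sciences"), ("Engineering", "Engineering & Technology"),
     ("Agriculture", "Engineering & Technology"), ("Health", "Life Sciences & Medicine"),
     ("Social", "Social Sciences & Management"), ("Economy", "Social Sciences & Management"),
     ("Education", "Social Sciences & Management"), ("Humanities", "Arts & Humanities"),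
     ("Art", "Arts & Humanities"), ("Religion", "Arts & Humanities")] := by decide
  rw [h1, h2]
  simp only [PySem.Dict.getD_eq_get?_getD, PySem.Dict.get?_mk_cons]
  split_ifs <;> rfl

-- pvPri names each group by its priority number, injectively on 1..5
theorem pvPri_eq_iff (y : Option String) (p : Nat) (g : String)
    (h : (p, g) ∈ [(1, "Life Sciences & Medicine"), (2, "Engineering & Technology"),
                   (3, "Natural Sciences"), (4, "Arts & Humanities"),
                   (5, "Social Sciences & Management")]) :
    pvPri y = p ↔ y = some g := by
  cases y with
  | none => fin_cases h <;> simp [pvPri]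
  | some g' =>
    simp only [pvPri, Option.some.injEq]
    fin_cases h <;> split_ifs <;> simp_all

-- ===== A-side characterisation =====

def pvStep (groups : PySem.Set String) (cat : String) : PySem.Set String :=
  match SINTA_TO_WCU.get? (PySem.Str.strip cat) with
  | some wcu => if wcu = "" then groups else PySem.Set.add groups wcu
  | none => groups

theorem mem_fold_step (cats : List String) (g0 : PySem.Set String) (w : String) :
    w ∈ cats.foldl pvStep g0 ↔
      w ∈ g0 ∨ some w ∈ cats.map (fun cat => SINTA_TO_WCU.get? (PySem.Str.strip cat)) := by
  induction cats generalizing g0 with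
  | nil => simp
  | cons c rest ih =>
    simp only [List.foldl_cons, List.map_cons, List.mem_cons, ih]
    unfold pvStep
    rcases h : SINTA_TO_WCU.get? (PySem.Str.strip c) with _ | wcu
    · simp
    · have hne : wcu ≠ "" := by
        intro he; have := sinta_get?_mem_order _ _ h; rw [he] at this; revert this; decide
      simp only [if_neg hne, PySem.Set.mem_add]
      constructor
      · rintro ((hg | he) | hm)
        · exact Or.inl hg
        · exact Or.inr (Or.inl (by rw [he]))
        · exact Or.inr (Or.inr hm)
      · rintro (hg | he | hm)
        · exact Or.inl (Or.inl hg)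
        · exact Or.inl (Or.inr (Option.some.inj he))
        · exact Or.inr hm

theorem nodup_fold_step (cats : List String) (g0 : PySem.Set String) (h0 : g0.Nodup) :
    (cats.foldl pvStep g0).Nodup := by
  induction cats generalizing g0 with
  | nil => exact h0
  | cons c rest ih =>
    apply ih
    unfold pvStep
    rcases SINTA_TO_WCU.get? (PySem.Str.strip c) with _ | wcu
    · exact h0
    · dsimp only
      split
      · exact h0
      · exact PySem.Set.nodup_add _ _ h0

-- A (on a nonempty string) is the ordered filter of pvOrder by membership in pvMs
theorem a_char (s : String) (hs : s ≠ "") :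
    parse_wcu_labels s = pvOrder.filter (fun g => decide (some g ∈ pvMs s)) := by
  unfold parse_wcu_labels
  rw [if_neg hs]
  set key : String → Int := fun g => WCU_PRIORITY.getD g 0 with hkey
  have hstep : (fun (groups : PySem.Set String) cat =>
      match SINTA_TO_WCU.get? (PySem.Str.strip cat) with
      | some wcu => if wcu = "" then groups else PySem.Set.add groups wcu
      | none => groups) = pvStep := rfl
  rw [hstep]
  set groups := ((PySem.Str.split? s ",").getD []).foldl pvStep PySem.Set.empty with hg
  set ys := pvOrder.filter (fun g => decide (some g ∈ pvMs s)) with hys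
  have hmem : ∀ w, w ∈ groups ↔ some w ∈ pvMs s := by
    intro w
    rw [hg, mem_fold_step]
    simp only [pvMs, PySem.Set.empty]
    simp
  have horder : ∀ w, some w ∈ pvMs s → w ∈ pvOrder := by
    intro w hw
    rcases List.mem_map.mp hw with ⟨c, _, hc⟩
    exact sinta_get?_mem_order _ _ hc
  have hnd1 : ys.Nodup := List.Nodup.filter _ (by decide)
  have hnd2 : groups.Nodup := nodup_fold_step _ PySem.Set.empty (by decide)
  have hperm : ys.Perm groups := by
    rw [List.perm_ext_iff_of_nodup hnd1 hnd2]
    intro g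
    rw [hys, List.mem_filter, hmem]
    simp only [decide_eq_true_iff]
    exact ⟨fun h => h.2, fun h => ⟨horder g h, h⟩⟩
  have hpw : ys.Pairwise (fun a b => key a < key b) := by
    apply List.Pairwise.filter
    rw [hkey]; decide
  exact PySem.List.sorted_eq_of_perm_of_pairwise_lt _ _ _ hperm hpw

-- ===== B-side characterisation =====

-- B's fold over a Nat accumulator (the Int fold is its cast image)
def pvNatStep (m : Nat) (c : String) : Nat :=
  m ||| (1 <<< pvPri (SINTA_TO_WCU.get? (PySem.Str.strip c)))

theorem fold_cast (cats : List String) (m : Nat) :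
    cats.foldl (fun mask cat =>
      PySem.Int.bor mask ((1 : Int) <<< (SINTA_TO_PRIORITY.getD (PySem.Str.strip cat) 0).toNat)) (m : Int)
    = ((cats.foldl pvNatStep m : Nat) : Int) := by
  induction cats generalizing m with
  | nil => rfl
  | cons c rest ih =>
    simp only [List.foldl_cons]
    rw [pri_rel]
    have hcast : PySem.Int.bor (m : Int) ((1 : Int) <<< pvPri (SINTA_TO_WCU.get? (PySem.Str.strip c)))
        = ((pvNatStep m c : Nat) : Int) := by
      have h2 : ((1:Int) <<< pvPri (SINTA_TO_WCU.get? (PySem.Str.strip c)))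
          = (((1 <<< pvPri (SINTA_TO_WCU.get? (PySem.Str.strip c)) : Nat)) : Int) := rfl
      rw [h2, PySem.Int.bor_natCast]; rfl
    rw [hcast, ih]

theorem testBit_fold (cats : List String) (m : Nat) (p : Nat) :
    (cats.foldl pvNatStep m).testBit p
      = (m.testBit p || cats.any (fun c => pvPri (SINTA_TO_WCU.get? (PySem.Str.strip c)) == p)) := by
  induction cats generalizing m with
  | nil => simp
  | cons c rest ih =>
    simp only [List.foldl_cons, List.any_cons, ih]
    have hstep : (pvNatStep m c).testBit p
        = (m.testBit p || (pvPri (SINTA_TO_WCU.get? (PySem.Str.strip c)) == p)) := by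
      unfold pvNatStep
      rw [Nat.testBit_or, Nat.shiftLeft_eq, Nat.one_mul, Nat.testBit_two_pow]
      by_cases hq : pvPri (SINTA_TO_WCU.get? (PySem.Str.strip c)) = p
      · simp [hq]
      · simp [hq]
    rw [hstep, Bool.or_assoc]

-- the generic bit test of the port, in Nat terms
theorem band_test (n p : Nat) :
    (PySem.Int.band ((n : Int) >>> p) 1 != 0) = n.testBit p := by
  have h1 : ((n:Int) >>> p) = ((n >>> p : Nat) : Int) := rfl
  have h2 : (1:Int) = ((1:Nat) : Int) := rfl
  rw [h1, h2, PySem.Int.band_natCast]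
  rcases Nat.mod_two_eq_zero_or_one (n >>> p) with h | h <;>
    simp [Nat.testBit, Nat.one_and_eq_mod_two, h]

-- B is the same ordered filter of pvOrder
theorem b_char (s : String) :
    parse_wcu_labels_alt s = pvOrder.filter (fun g => decide (some g ∈ pvMs s)) := by
  unfold parse_wcu_labels_alt
  have hfold := fold_cast ((PySem.Str.split? s ",").getD []) 0
  simp only [Nat.cast_zero] at hfold
  rw [hfold]
  set n := ((PySem.Str.split? s ",").getD []).foldl pvNatStep 0 with hn
  have hrange : PySem.List.pyRange 1 6 1 = [1, 2, 3, 4, 5] := by decide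
  rw [hrange]
  have hbit : ∀ p : Nat, n.testBit p
      = ((PySem.Str.split? s ",").getD []).any
          (fun c => pvPri (SINTA_TO_WCU.get? (PySem.Str.strip c)) == p) := by
    intro p; rw [hn, testBit_fold]; simp
  have hpt : ∀ (p : Nat) (g : String),
      (p, g) ∈ [(1, "Life Sciences & Medicine"), (2, "Engineering & Technology"),
                 (3, "Natural Sciences"), (4, "Arts & Humanities"),
                 (5, "Social Sciences & Management")] →
      (PySem.Int.band (((n : Nat) : Int) >>> p) 1 != 0) = decide (some g ∈ pvMs s) := by
    intro p g hpg
    rw [band_test, hbit]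
    simp only [pvMs, List.mem_map]
    rw [Bool.eq_iff_iff]
    simp only [List.any_eq_true, beq_iff_eq, decide_eq_true_eq]
    constructor
    · rintro ⟨c, hc, hp⟩
      exact ⟨c, hc, (pvPri_eq_iff _ _ _ hpg).mp hp⟩
    · rintro ⟨c, hc, he⟩
      exact ⟨c, hc, (pvPri_eq_iff _ _ _ hpg).mpr he⟩
  have hmap : pvOrder
      = ([1, 2, 3, 4, 5] : List Int).map (fun p => PySem.List.pyGetD GROUP_BY_PRIORITY p "") := by
    decide
  rw [hmap, List.filter_map]
  dsimp only
  congr 1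
  apply List.filter_congr
  intro p hp
  fin_cases hp
  · simpa using hpt 1 "Life Sciences & Medicine" (by decide)
  · simpa using hpt 2 "Engineering & Technology" (by decide)
  · simpa using hpt 3 "Natural Sciences" (by decide)
  · simpa using hpt 4 "Arts & Humanities" (by decide)
  · simpa using hpt 5 "Social Sciences & Management" (by decide)

-- ===== VERDICT (by name: the statement is the Claim_ definition above) =====
theorem parse_wcu_labels_spec : Claim_equal_parse_wcu_labels := by
  intro s _
  show parse_wcu_labels s = parse_wcu_labels_alt s
  by_cases hs : s = ""
  · subst hs; decide
  · rw [a_char s hs, b_char s]
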